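-- pv_equiv track=rewrite | github.com/SophiaRauh/es_conn_lex | processing_filtering.py | conn_count
-- ===== SOURCE A (Python) =====
-- from collections import Counter, defaultdict
--
-- def conn_count(alignments, lex):
--     """Counts the connective alignments and sorts them
--
--     Parameters
--     ----------
--     alignments : dict
--         A dictionary that contains all alignments unsorted and uncounted
--     lex : list
--         A list with the connectives of a language
--
--     Returns
--     -------
--     count : dict
--         A dictionary with sorted and counted alignments
--     """
--
--     count = dict()
--     for key in lex:
--         try:
--             count[key] = Counter(alignments[key])
--         except KeyError:
--             pass
--
--     return count
-- ===== SOURCE B (Python) =====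
-- def conn_count(alignments, lex):
--     """Counts the connective alignments per lexicon connective.
--
--     One filtered pass over alignments tallies every alignment token by hand
--     (no Counter); the result dict is then assembled in lex order.
--     """
--     keep = set(lex)
--     tallies = {}
--     for k, vals in alignments.items():
--         if k in keep:
--             c = {}
--             for t in vals:
--                 c[t] = c.get(t, 0) + 1
--             tallies[k] = c
--     return {k: tallies[k] for k in lex if k in tallies}
-- ===== Notes on version B (the rewrite author's own statement) =====
-- stated objective: alternative
-- what changed: B drives the main loop over alignments.items() with a set-membership filter and tallies each alignment token by hand with an explicit increment loop over a plain dict (no Counter and no try/except probe), then assembles the output by walking lex over the prebuilt table; A loops over lex and probes alignments[key] with try/except, delegating counting to Counter.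
import Mathlib
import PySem

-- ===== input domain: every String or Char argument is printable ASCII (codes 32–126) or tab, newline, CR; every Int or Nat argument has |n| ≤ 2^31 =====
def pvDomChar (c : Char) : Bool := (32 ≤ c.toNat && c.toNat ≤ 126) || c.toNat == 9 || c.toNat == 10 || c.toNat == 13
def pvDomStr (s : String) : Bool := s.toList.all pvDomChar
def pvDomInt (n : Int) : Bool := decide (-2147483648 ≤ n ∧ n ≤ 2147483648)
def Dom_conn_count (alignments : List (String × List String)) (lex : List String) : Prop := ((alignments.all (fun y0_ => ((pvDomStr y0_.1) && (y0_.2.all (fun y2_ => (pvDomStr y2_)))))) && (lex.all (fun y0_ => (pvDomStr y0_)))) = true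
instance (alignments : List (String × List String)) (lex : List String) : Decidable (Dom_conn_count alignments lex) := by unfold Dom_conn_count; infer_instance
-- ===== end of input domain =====

-- B tallies alignment tokens by hand in one filtered pass over alignments, then assembles the
-- output in lex order, instead of A's per-lex-key try/except probe with Counter; same values.

-- ===== PORT A =====
-- for key in lex: try count[key] = Counter(alignments[key]) except KeyError: pass
def conn_count (alignments : List (String × List String)) (lex : List String) : List (String × List (String × Int)) :=
  (lex.foldl (fun count key =>
      match (PySem.Dict.mk alignments).get? key with
      | some v => count.insert key (PySem.Dict.counter v).items
      | none   => count)
    (PySem.Dict.empty : PySem.Dict String (List (String × Int)))).items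

-- ===== PORT B =====
-- for k, vals in alignments.items(): if k in keep: c = {}; for t in vals: c[t] = c.get(t, 0) + 1; tallies[k] = c
def connTallies (alignments : List (String × List String)) (lex : List String) : PySem.Dict String (List (String × Int)) :=
  alignments.foldl (fun d kv =>
      if kv.1 ∈ PySem.Set.ofList lex then
        d.insert kv.1
          ((kv.2.foldl (fun c t => c.insert t (c.getD t 0 + 1))
              (PySem.Dict.empty : PySem.Dict String Int)).items)
      else d)
    PySem.Dict.empty

-- return {k: tallies[k] for k in lex if k in tallies}
def conn_count_alt (alignments : List (String × List String)) (lex : List String) : List (String × List (String × Int)) :=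
  (lex.foldl (fun out k =>
      match (connTallies alignments lex).get? k with
      | some c => out.insert k c
      | none   => out)
    (PySem.Dict.empty : PySem.Dict String (List (String × Int)))).items

-- ===== PRECONDITION & SPEC =====
-- Pre_ excludes association lists with duplicate keys in alignments: they do not represent a
-- Python dict (dict construction collapses them), so first-vs-last-match is an encoding accident.
def Pre_conn_count (alignments : List (String × List String)) (lex : List String) : Prop :=
  (alignments.map Prod.fst).Nodup
instance (alignments : List (String × List String)) (lex : List String) : Decidable (Pre_conn_count alignments lex) := by unfold Pre_conn_count; infer_instance

def pvWitness_conn_count : (List (String × List String)) × List String :=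
  ([("a", ["x", "x", "y"]), ("b", ["z"])], ["b", "a", "c"])

def Spec_conn_count (alignments : List (String × List String)) (lex : List String) (out : List (String × List (String × Int))) : Prop := out = conn_count_alt alignments lex
instance (alignments : List (String × List String)) (lex : List String) (out : List (String × List (String × Int))) : Decidable (Spec_conn_count alignments lex out) := by unfold Spec_conn_count; infer_instance

-- ===== CLAIM (what is proved, stated in full; the proofs are below) =====
def Claim_equal_conn_count : Prop := ∀ (alignments : List (String × List String)) (lex : List String), Dom_conn_count alignments lex → Pre_conn_count alignments lex → Spec_conn_count alignments lex (conn_count alignments lex)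

-- ===== LEMMAS AND PROOFS =====

theorem mk_get?_eq_none {as : List (String × List String)} {k : String}
    (h : k ∉ as.map Prod.fst) : (PySem.Dict.mk as).get? k = none := by
  induction as with
  | nil => rfl
  | cons a as ih =>
    simp only [List.map_cons, List.mem_cons, not_or] at h
    rw [PySem.Dict.get?_mk_cons]
    simp [beq_iff_eq, Ne.symm h.1, ih h.2]

-- B's hand tally is Counter (PySem lemma, definitional)
theorem tally_eq_counter (v : List String) :
    (v.foldl (fun c t => c.insert t (c.getD t 0 + 1))
        (PySem.Dict.empty : PySem.Dict String Int)) = PySem.Dict.counter v :=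
  PySem.Dict.foldl_insert_getD_add_one_eq_counter v

-- get? of B's one-pass table, characterised by A's lookup into alignments
theorem connTallies_fold_get (lex : List String) (k : String) :
    ∀ (as : List (String × List String)) (d : PySem.Dict String (List (String × Int))),
    (as.map Prod.fst).Nodup →
    (as.foldl (fun d kv =>
        if kv.1 ∈ PySem.Set.ofList lex then
          d.insert kv.1
            ((kv.2.foldl (fun c t => c.insert t (c.getD t 0 + 1))
                (PySem.Dict.empty : PySem.Dict String Int)).items)
        else d)
      d).get? k =
      (match (PySem.Dict.mk as).get? k with
       | some v => if k ∈ lex then some (PySem.Dict.counter v).items else d.get? k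
       | none   => d.get? k) := by
  intro as
  induction as with
  | nil => intro d _; rfl
  | cons a as ih =>
    intro d hnd
    simp only [List.map_cons, List.nodup_cons] at hnd
    rw [List.foldl_cons, ih _ hnd.2, PySem.Dict.get?_mk_cons]
    by_cases hk : a.1 = k
    · subst hk
      rw [mk_get?_eq_none hnd.1]
      simp only [beq_self_eq_true, if_true]
      by_cases hl : a.1 ∈ lex
      · simp [PySem.Set.mem_ofList, hl, tally_eq_counter, PySem.Dict.get?_insert_self]
      · simp [PySem.Set.mem_ofList, hl]
    · have hb : (a.1 == k) = false := by simp [hk]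
      simp only [hb, Bool.false_eq_true, if_false]
      by_cases hl : a.1 ∈ lex
      · simp [PySem.Set.mem_ofList, hl, PySem.Dict.get?_insert_of_ne _ _ (Ne.symm hk)]
      · simp [PySem.Set.mem_ofList, hl]

theorem connTallies_get (alignments : List (String × List String)) (lex : List String)
    (hnd : (alignments.map Prod.fst).Nodup) (k : String) (hk : k ∈ lex) :
    (connTallies alignments lex).get? k =
      (match (PySem.Dict.mk alignments).get? k with
       | some v => some (PySem.Dict.counter v).items
       | none   => none) := by
  unfold connTallies
  rw [connTallies_fold_get lex k alignments PySem.Dict.empty hnd]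
  cases (PySem.Dict.mk alignments).get? k with
  | none => simp [PySem.Dict.get?_empty]
  | some v => simp [hk]

-- ===== VERDICT (by name: the statement is the Claim_ definition above) =====
theorem conn_count_spec : Claim_equal_conn_count := by
  intro alignments lex _ hpre
  unfold Spec_conn_count conn_count conn_count_alt
  congr 1
  apply PySem.List.foldl_congr_mem
  intro out k hk
  rw [connTallies_get alignments lex hpre k hk]
  cases (PySem.Dict.mk alignments).get? k <;> rfl
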